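-- pv_equiv track=rewrite | github.com/pypi-data/pypi-mirror-403 | packages/m4-infra/m4_infra-0.4.2-py3-none-any.whl/m4/core/validation.py | format_error_with_guidance
-- ===== SOURCE A (Python) =====
-- def format_error_with_guidance(
--     error: str,
--     tool_type: str = "query",
-- ) -> str:
--     """Format an error message with helpful guidance for the user.
--
--     Args:
--         error: The error message
--         tool_type: Type of tool that failed (query, schema, etc.)
--
--     Returns:
--         Formatted error message with suggestions
--     """
--     error_lower = error.lower()
--     suggestions = []
--
--     if "no such table" in error_lower or "table not found" in error_lower:
--         suggestions.append("Use `get_database_schema()` to see exact table names")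
--         suggestions.append("Check if the table name matches exactly (case-sensitive)")
--
--     if "no such column" in error_lower or "column not found" in error_lower:
--         suggestions.append(
--             "Use `get_table_info('table_name')` to see available columns"
--         )
--         suggestions.append(
--             "Column might be named differently (e.g., 'anchor_age' not 'age')"
--         )
--
--     if "syntax error" in error_lower:
--         suggestions.append("Check quotes, commas, and parentheses")
--         suggestions.append("Try simpler: `SELECT * FROM table_name LIMIT 5`")
--
--     if not suggestions:
--         suggestions.append("Use `get_database_schema()` to see available tables")
--         suggestions.append("Use `get_table_info('table_name')` to understand the data")
--
--     suggestion_text = "\n".join(f"  - {s}" for s in suggestions)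
--
--     return f"""Error: {error}
--
-- How to fix:
-- {suggestion_text}
--
-- Recovery steps:
-- 1. `get_database_schema()` - See what tables exist
-- 2. `get_table_info('your_table')` - Check exact column names
-- 3. Retry your query with correct names"""
-- ===== SOURCE B (Python) =====
-- # The "How to fix" block is fully determined by which of the three error
-- # categories match, so precompute the finished block for every combination
-- # and just look it up: no suggestion list, no extend, no join at call time.
-- _FIX = {
--     (False, False, False): "  - Use `get_database_schema()` to see available tables\n  - Use `get_table_info('table_name')` to understand the data",
--     (False, False, True): "  - Check quotes, commas, and parentheses\n  - Try simpler: `SELECT * FROM table_name LIMIT 5`",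
--     (False, True, False): "  - Use `get_table_info('table_name')` to see available columns\n  - Column might be named differently (e.g., 'anchor_age' not 'age')",
--     (False, True, True): "  - Use `get_table_info('table_name')` to see available columns\n  - Column might be named differently (e.g., 'anchor_age' not 'age')\n  - Check quotes, commas, and parentheses\n  - Try simpler: `SELECT * FROM table_name LIMIT 5`",
--     (True, False, False): "  - Use `get_database_schema()` to see exact table names\n  - Check if the table name matches exactly (case-sensitive)",
--     (True, False, True): "  - Use `get_database_schema()` to see exact table names\n  - Check if the table name matches exactly (case-sensitive)\n  - Check quotes, commas, and parentheses\n  - Try simpler: `SELECT * FROM table_name LIMIT 5`",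
--     (True, True, False): "  - Use `get_database_schema()` to see exact table names\n  - Check if the table name matches exactly (case-sensitive)\n  - Use `get_table_info('table_name')` to see available columns\n  - Column might be named differently (e.g., 'anchor_age' not 'age')",
--     (True, True, True): "  - Use `get_database_schema()` to see exact table names\n  - Check if the table name matches exactly (case-sensitive)\n  - Use `get_table_info('table_name')` to see available columns\n  - Column might be named differently (e.g., 'anchor_age' not 'age')\n  - Check quotes, commas, and parentheses\n  - Try simpler: `SELECT * FROM table_name LIMIT 5`",
-- }
--
--
-- def format_error_with_guidance(error, tool_type="query"):
--     e = error.lower()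
--     key = (
--         "no such table" in e or "table not found" in e,
--         "no such column" in e or "column not found" in e,
--         "syntax error" in e,
--     )
--     return (
--         "Error: " + error + "\n\nHow to fix:\n" + _FIX[key]
--         + "\n\nRecovery steps:\n"
--         + "1. `get_database_schema()` - See what tables exist\n"
--         + "2. `get_table_info('your_table')` - Check exact column names\n"
--         + "3. Retry your query with correct names"
--     )
-- ===== Notes on version B (the rewrite author's own statement) =====
-- stated objective: alternative
-- what changed: B precomputes the finished guidance block for every combination of the three error categories in a dict keyed by a boolean triple; at call time it only classifies the error and looks the block up, with no suggestion-list building, extend or join.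
import Mathlib
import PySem

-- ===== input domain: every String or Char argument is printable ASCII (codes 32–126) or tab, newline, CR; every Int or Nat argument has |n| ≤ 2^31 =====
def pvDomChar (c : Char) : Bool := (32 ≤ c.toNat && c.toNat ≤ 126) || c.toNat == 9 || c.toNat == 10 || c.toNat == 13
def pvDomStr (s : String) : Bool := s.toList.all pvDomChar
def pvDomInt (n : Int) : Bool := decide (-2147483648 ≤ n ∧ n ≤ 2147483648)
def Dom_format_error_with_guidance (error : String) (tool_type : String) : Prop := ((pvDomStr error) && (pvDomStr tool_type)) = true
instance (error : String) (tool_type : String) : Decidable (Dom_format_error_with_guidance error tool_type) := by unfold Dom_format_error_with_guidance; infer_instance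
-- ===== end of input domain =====

-- B precomputes the finished "How to fix" block for each of the 8 category combinations and
-- looks it up by a boolean triple; no list building or join at call time (objective: alternative).
-- tool_type is unused by both, as in the Python.

-- ===== PORT A =====
def format_error_with_guidance (error : String) (tool_type : String) : String :=
  let error_lower := PySem.Str.lower error
  let suggestions : List String := []
  let suggestions :=
    if PySem.Str.isIn "no such table" error_lower || PySem.Str.isIn "table not found" error_lower then
      suggestions ++ ["Use `get_database_schema()` to see exact table names"]
        ++ ["Check if the table name matches exactly (case-sensitive)"]
    else suggestions
  let suggestions :=
    if PySem.Str.isIn "no such column" error_lower || PySem.Str.isIn "column not found" error_lower then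
      suggestions ++ ["Use `get_table_info('table_name')` to see available columns"]
        ++ ["Column might be named differently (e.g., 'anchor_age' not 'age')"]
    else suggestions
  let suggestions :=
    if PySem.Str.isIn "syntax error" error_lower then
      suggestions ++ ["Check quotes, commas, and parentheses"]
        ++ ["Try simpler: `SELECT * FROM table_name LIMIT 5`"]
    else suggestions
  let suggestions :=
    if suggestions.isEmpty then
      suggestions ++ ["Use `get_database_schema()` to see available tables"]
        ++ ["Use `get_table_info('table_name')` to understand the data"]
    else suggestions
  let suggestion_text := PySem.Str.join "\n" (suggestions.map (fun s => "  - " ++ s))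
  "Error: " ++ error ++ "\n\nHow to fix:\n" ++ suggestion_text
    ++ "\n\nRecovery steps:\n1. `get_database_schema()` - See what tables exist\n2. `get_table_info('your_table')` - Check exact column names\n3. Retry your query with correct names"

-- ===== PORT B =====
-- _FIX: dict keyed by the boolean category triple, values are the finished blocks
def pvFix : PySem.Dict (Bool × Bool × Bool) String := PySem.Dict.ofList
  [((false, false, false), "  - Use `get_database_schema()` to see available tables\n  - Use `get_table_info('table_name')` to understand the data"),
   ((false, false, true),  "  - Check quotes, commas, and parentheses\n  - Try simpler: `SELECT * FROM table_name LIMIT 5`"),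
   ((false, true, false),  "  - Use `get_table_info('table_name')` to see available columns\n  - Column might be named differently (e.g., 'anchor_age' not 'age')"),
   ((false, true, true),   "  - Use `get_table_info('table_name')` to see available columns\n  - Column might be named differently (e.g., 'anchor_age' not 'age')\n  - Check quotes, commas, and parentheses\n  - Try simpler: `SELECT * FROM table_name LIMIT 5`"),
   ((true, false, false),  "  - Use `get_database_schema()` to see exact table names\n  - Check if the table name matches exactly (case-sensitive)"),
   ((true, false, true),   "  - Use `get_database_schema()` to see exact table names\n  - Check if the table name matches exactly (case-sensitive)\n  - Check quotes, commas, and parentheses\n  - Try simpler: `SELECT * FROM table_name LIMIT 5`"),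
   ((true, true, false),   "  - Use `get_database_schema()` to see exact table names\n  - Check if the table name matches exactly (case-sensitive)\n  - Use `get_table_info('table_name')` to see available columns\n  - Column might be named differently (e.g., 'anchor_age' not 'age')"),
   ((true, true, true),    "  - Use `get_database_schema()` to see exact table names\n  - Check if the table name matches exactly (case-sensitive)\n  - Use `get_table_info('table_name')` to see available columns\n  - Column might be named differently (e.g., 'anchor_age' not 'age')\n  - Check quotes, commas, and parentheses\n  - Try simpler: `SELECT * FROM table_name LIMIT 5`")]

def format_error_with_guidance_alt (error : String) (tool_type : String) : String :=
  let e := PySem.Str.lower error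
  let key : Bool × Bool × Bool :=
    (PySem.Str.isIn "no such table" e || PySem.Str.isIn "table not found" e,
     PySem.Str.isIn "no such column" e || PySem.Str.isIn "column not found" e,
     PySem.Str.isIn "syntax error" e)
  -- _FIX[key]: the key is always present (all 8 triples are in pvFix), so getD never uses ""
  "Error: " ++ error ++ "\n\nHow to fix:\n" ++ (PySem.Dict.getD pvFix key "")
    ++ "\n\nRecovery steps:\n"
    ++ "1. `get_database_schema()` - See what tables exist\n"
    ++ "2. `get_table_info('your_table')` - Check exact column names\n"
    ++ "3. Retry your query with correct names"

-- ===== PRECONDITION & SPEC =====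
def Spec_format_error_with_guidance (error : String) (tool_type : String) (out : String) : Prop := out = format_error_with_guidance_alt error tool_type
instance (error : String) (tool_type : String) (out : String) : Decidable (Spec_format_error_with_guidance error tool_type out) := by unfold Spec_format_error_with_guidance; infer_instance

-- ===== CLAIM =====
def Claim_equal_format_error_with_guidance : Prop := ∀ (error : String) (tool_type : String), Dom_format_error_with_guidance error tool_type → Spec_format_error_with_guidance error tool_type (format_error_with_guidance error tool_type)

-- ===== LEMMAS AND PROOFS =====

-- ===== VERDICT =====
set_option maxRecDepth 4096 in
theorem format_error_with_guidance_spec : Claim_equal_format_error_with_guidance := by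
  intro error tool_type _
  unfold Spec_format_error_with_guidance format_error_with_guidance format_error_with_guidance_alt
  cases h1 : PySem.Str.isIn "no such table" (PySem.Str.lower error) <;>
  cases h2 : PySem.Str.isIn "table not found" (PySem.Str.lower error) <;>
  cases h3 : PySem.Str.isIn "no such column" (PySem.Str.lower error) <;>
  cases h4 : PySem.Str.isIn "column not found" (PySem.Str.lower error) <;>
  cases h5 : PySem.Str.isIn "syntax error" (PySem.Str.lower error) <;>
  simp only [h1, h2, h3, h4, h5, Bool.or_false, Bool.false_eq_true, Bool.true_eq_false] <;>
  simp [pvFix, PySem.Dict.ofList, PySem.Dict.getD, PySem.Dict.get?, PySem.Str.join,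
    String.append_assoc] <;> decide
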